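-- pv_equiv track=rewrite | github.com/DrGeoff/compiletools | src/compiletools/utils.py | deduplicate_compiler_flags
-- ===== SOURCE A (Python) =====
-- def deduplicate_compiler_flags(flags: list[str]) -> list[str]:
--     """Deduplicate compiler flags with smart handling for flag-argument pairs.
--
--     Handles both single flags and flag-argument pairs like:
--     - '-I path', '-isystem path', '-L path', '-D macro'
--     - '-Ipath', '-isystempath', '-Lpath', '-Dmacro'
--
--     Preserves order and removes duplicates based on the argument/path portion.
--     """
--     if not flags:
--         return flags
--
--     # Flags that take arguments (both separate and combined forms)
--     # Ordered longest-first to ensure correct prefix matching (-framework before -F)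
--     FLAG_WITH_ARGS = ("-framework", "-isystem", "-I", "-L", "-l", "-D", "-U", "-F")
--
--     deduplicated = []
--     seen_flag_args = {}  # flag -> set of seen arguments
--     seen_simple_flags = set()
--     i = 0
--
--     while i < len(flags):
--         flag = flags[i]
--
--         # Find matching flag prefix efficiently
--         matched_flag = None
--         for flag_prefix in FLAG_WITH_ARGS:
--             if flag == flag_prefix or (flag.startswith(flag_prefix) and len(flag) > len(flag_prefix)):
--                 matched_flag = flag_prefix
--                 break
--
--         if matched_flag:
--             if flag == matched_flag and i + 1 < len(flags):
--                 # Separate form: '-I path'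
--                 arg = flags[i + 1]
--                 if matched_flag not in seen_flag_args:
--                     seen_flag_args[matched_flag] = set()
--                 if arg not in seen_flag_args[matched_flag]:
--                     deduplicated.extend([flag, arg])
--                     seen_flag_args[matched_flag].add(arg)
--                 i += 2
--             elif flag.startswith(matched_flag):
--                 # Combined form: '-Ipath'
--                 arg = flag[len(matched_flag) :]
--                 if matched_flag not in seen_flag_args:
--                     seen_flag_args[matched_flag] = set()
--                 if arg not in seen_flag_args[matched_flag]:
--                     deduplicated.append(flag)
--                     seen_flag_args[matched_flag].add(arg)
--                 i += 1
--             else: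
--                 i += 1
--         else:
--             # Regular flag - use set-based deduplication for O(1) lookup
--             if flag not in seen_simple_flags:
--                 deduplicated.append(flag)
--                 seen_simple_flags.add(flag)
--             i += 1
--
--     return deduplicated
-- ===== SOURCE B (Python) =====
-- _FLAG_WITH_ARGS = ("-framework", "-isystem", "-I", "-L", "-l", "-D", "-U", "-F")
--
--
-- def _tokenize(flags):
--     """Split flags into units (dedup key, output tokens); keys are (prefix, arg) or ('simple', flag)."""
--     units = []
--     i = 0
--     n = len(flags)
--     while i < n:
--         flag = flags[i]
--         prefix = next((p for p in _FLAG_WITH_ARGS if flag.startswith(p)), None)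
--         if prefix is None:
--             units.append((("simple", flag), [flag]))
--             i += 1
--         elif flag == prefix and i + 1 < n:
--             units.append(((prefix, flags[i + 1]), [flag, flags[i + 1]]))
--             i += 2
--         else:
--             units.append(((prefix, flag[len(prefix):]), [flag]))
--             i += 1
--     return units
--
--
-- def deduplicate_compiler_flags(flags: list[str]) -> list[str]:
--     """Deduplicate by first-occurrence index: a backward overwrite pass computes each key's
--     first index, then a filter keeps exactly the unit sitting at that index (no seen-set)."""
--     units = _tokenize(flags)
--     first = {}
--     for idx, (key, _toks) in reversed(list(enumerate(units))):
--         first[key] = idx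
--     return [tok for idx, (key, toks) in enumerate(units) if first[key] == idx for tok in toks]
-- ===== Notes on version B (the rewrite author's own statement) =====
-- stated objective: alternative
-- what changed: A deduplicates inside one index-driven scan using a dict of per-prefix seen-argument sets plus a simple-flag set; B tokenizes into keyed units, computes each key's first-occurrence index with a single backward overwrite pass over the enumerated units (no seen-set or membership test), and then keeps exactly the unit whose position equals its key's first index.
import Mathlib
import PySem

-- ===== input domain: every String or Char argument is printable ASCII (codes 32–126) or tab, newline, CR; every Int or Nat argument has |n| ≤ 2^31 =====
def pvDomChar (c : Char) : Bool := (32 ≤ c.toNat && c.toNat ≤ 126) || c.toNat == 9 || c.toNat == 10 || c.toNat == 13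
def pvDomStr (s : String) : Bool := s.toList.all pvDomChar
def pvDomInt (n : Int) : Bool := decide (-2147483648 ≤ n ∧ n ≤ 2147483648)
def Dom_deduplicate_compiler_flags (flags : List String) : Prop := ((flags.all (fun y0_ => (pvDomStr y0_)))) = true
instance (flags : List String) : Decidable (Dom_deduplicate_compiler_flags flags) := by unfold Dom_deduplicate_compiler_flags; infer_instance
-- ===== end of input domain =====

-- B replaces A's single seen-set dedup scan by: tokenize into keyed units, compute each key's
-- first-occurrence index with one backward overwrite pass, keep the unit at that index
-- (objective: alternative; same cost).

-- ===== PORT A =====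
def pvFlagPrefixes : List String :=
  ["-framework", "-isystem", "-I", "-L", "-l", "-D", "-U", "-F"]

-- A's prefix search: first prefix with flag == p or (flag.startswith(p) and len(flag) > len(p))
def pvMatchA (flag : String) : Option String :=
  pvFlagPrefixes.find? (fun p =>
    flag == p || (PySem.Str.startswith flag p && decide (PySem.Str.len p < PySem.Str.len flag)))

def pvLoopA : List String → PySem.Dict String (PySem.Set String) → PySem.Set String →
    List String → List String
  | [], _, _, acc => acc
  | flag :: rest, dict, simple, acc =>
    match pvMatchA flag with
    | some p =>
      if flag == p then
        match rest with
        | arg :: rest2 =>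
          -- separate form '-I path'
          let dict1 := if dict.contains p then dict else dict.insert p PySem.Set.empty
          let s := dict1.getD p PySem.Set.empty
          if s.contains arg then pvLoopA rest2 dict1 simple acc
          else pvLoopA rest2 (dict1.insert p (s.add arg)) simple (acc ++ [flag, arg])
        | [] =>
          -- combined branch reached with flag == p at the end of the list (arg = "")
          let arg := PySem.Str.slice flag (some (PySem.Str.len p)) none
          let dict1 := if dict.contains p then dict else dict.insert p PySem.Set.empty
          let s := dict1.getD p PySem.Set.empty
          if s.contains arg then pvLoopA [] dict1 simple acc
          else pvLoopA [] (dict1.insert p (s.add arg)) simple (acc ++ [flag])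
      else
        -- combined form '-Ipath'
        let arg := PySem.Str.slice flag (some (PySem.Str.len p)) none
        let dict1 := if dict.contains p then dict else dict.insert p PySem.Set.empty
        let s := dict1.getD p PySem.Set.empty
        if s.contains arg then pvLoopA rest dict1 simple acc
        else pvLoopA rest (dict1.insert p (s.add arg)) simple (acc ++ [flag])
    | none =>
      if simple.contains flag then pvLoopA rest dict simple acc
      else pvLoopA rest dict (simple.add flag) (acc ++ [flag])
  termination_by xs => xs.length
  decreasing_by all_goals simp

def deduplicate_compiler_flags (flags : List String) : List String :=
  if flags = [] then flags
  else pvLoopA flags PySem.Dict.empty PySem.Set.empty []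

-- ===== PORT B =====
-- B's prefix search: first prefix with flag.startswith(p)
def pvMatchB (flag : String) : Option String :=
  pvFlagPrefixes.find? (fun p => PySem.Str.startswith flag p)

-- _tokenize: units of (dedup key, output tokens)
def pvTokenize : List String → List ((String × String) × List String)
  | [] => []
  | flag :: rest =>
    match pvMatchB flag with
    | none => (("simple", flag), [flag]) :: pvTokenize rest
    | some p =>
      if flag == p then
        match rest with
        | arg :: rest2 => ((p, arg), [flag, arg]) :: pvTokenize rest2
        | [] => ((p, PySem.Str.slice flag (some (PySem.Str.len p)) none), [flag]) :: pvTokenize []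
      else ((p, PySem.Str.slice flag (some (PySem.Str.len p)) none), [flag]) :: pvTokenize rest
  termination_by xs => xs.length
  decreasing_by all_goals simp

-- backward overwrite pass: for idx, (key, _toks) in reversed(list(enumerate(units))): first[key] = idx
def pvFirstIdx (units : List ((String × String) × List String)) :
    PySem.Dict (String × String) Int :=
  ((PySem.List.enumerate units).reverse).foldl (fun d p => d.insert p.2.1 p.1) PySem.Dict.empty

-- out pass: [tok for idx,(key,toks) in enumerate(units) if first[key]==idx for tok in toks]
-- (every key is in `first` after the backward pass, so the -1 default is never consulted)
def deduplicate_compiler_flags_alt (flags : List String) : List String :=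
  let units := pvTokenize flags
  let first := pvFirstIdx units
  (PySem.List.enumerate units).foldl
    (fun acc p => if first.getD p.2.1 (-1) == p.1 then acc ++ p.2.2 else acc) []

-- ===== PRECONDITION & SPEC =====
def Spec_deduplicate_compiler_flags (flags : List String) (out : List String) : Prop := out = deduplicate_compiler_flags_alt flags
instance (flags : List String) (out : List String) : Decidable (Spec_deduplicate_compiler_flags flags out) := by unfold Spec_deduplicate_compiler_flags; infer_instance

-- ===== CLAIM (what is proved, stated in full; the proofs are below) =====
def Claim_equal_deduplicate_compiler_flags : Prop := ∀ (flags : List String), Dom_deduplicate_compiler_flags flags → Spec_deduplicate_compiler_flags flags (deduplicate_compiler_flags flags)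

-- ===== LEMMAS AND PROOFS =====

lemma pvFind_congr {α : Type} (l : List α) {p q : α → Bool} (h : ∀ a ∈ l, p a = q a) :
    l.find? p = l.find? q := by
  induction l with
  | nil => rfl
  | cons a t ih =>
    simp only [List.find?_cons, h a (by simp)]
    cases q a
    · exact ih (fun x hx => h x (by simp [hx]))
    · rfl

-- A's and B's prefix tests select the same prefix
lemma pvMatch_eq (f : String) : pvMatchA f = pvMatchB f := by
  unfold pvMatchA pvMatchB
  apply pvFind_congr
  intro p _
  cases h : PySem.Str.startswith f p with
  | false =>
    have hne : f ≠ p := by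
      rintro rfl
      have h2 := (PySem.Chars.startswith_iff f.toList f.toList).mpr (List.prefix_refl _)
      rw [PySem.Str.startswith_eq, h2] at h
      cases h
    simp [hne]
  | true =>
    by_cases he : f = p
    · subst he; simp
    · have hpre : p.toList <+: f.toList := by
        rw [PySem.Str.startswith_eq] at h
        exact (PySem.Chars.startswith_iff _ _).mp h
      have hlt : p.toList.length < f.toList.length := by
        rcases Nat.lt_or_ge p.toList.length f.toList.length with h' | h'
        · exact h'
        · exact absurd (String.toList_inj.mp
            (hpre.eq_of_length (Nat.le_antisymm hpre.length_le h'))).symm he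
      have hlt' : PySem.Str.len p < PySem.Str.len f := by
        rw [PySem.Str.len_eq, PySem.Str.len_eq]
        exact_mod_cast hlt
      simp
      exact Or.inr (Nat.lt_of_succ_le hlt)

-- reference deduplication: keep a unit iff its key is not forbidden, forbidding it afterwards
def pvSpec : List ((String × String) × List String) → List (String × String) → List String
  | [], _ => []
  | (k, t) :: rest, forb =>
    if k ∈ forb then pvSpec rest forb else t ++ pvSpec rest (k :: forb)

-- proof-only intermediate: single-seen-set dedup over the units
def pvDedup : List ((String × String) × List String) → PySem.Set (String × String) →
    List String → List String
  | [], _, out => out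
  | (key, toks) :: rest, seen, out =>
    if seen.contains key then pvDedup rest seen out
    else pvDedup rest (seen.add key) (out ++ toks)

-- correspondence between A's (dict-of-sets, simple-set) and a single key set
def pvRel (dict : PySem.Dict String (PySem.Set String)) (simple : PySem.Set String)
    (seen : PySem.Set (String × String)) : Prop :=
  (∀ p arg, p ∈ pvFlagPrefixes →
      ((dict.getD p PySem.Set.empty).contains arg = seen.contains (p, arg))) ∧
  (∀ f, simple.contains f = seen.contains ("simple", f))

lemma pvRel_empty : pvRel PySem.Dict.empty PySem.Set.empty PySem.Set.empty := by
  constructor <;> intros <;> rfl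

lemma pvPrefix_ne_simple {p : String} (hp : p ∈ pvFlagPrefixes) : p ≠ "simple" := by
  fin_cases hp <;> decide

lemma pvSet_contains_add {α : Type} [BEq α] [LawfulBEq α] (s : PySem.Set α) (x y : α) :
    (PySem.Set.add s x).contains y = (s.contains y || x == y) := by
  cases hxy : x == y
  · have hxy' : ¬ y = x := fun h' => (by simpa using hxy : x ≠ y) h'.symm
    unfold PySem.Set.add PySem.Set.contains
    split_ifs with h
    · simp
    · simp [List.mem_append, hxy']
  · have hxy' : x = y := by simpa using hxy
    subst hxy'
    unfold PySem.Set.add PySem.Set.contains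
    split_ifs with h <;> simp_all

lemma pvEnsure_getD (dict : PySem.Dict String (PySem.Set String)) (p q : String) :
    ((if dict.contains p then dict else dict.insert p PySem.Set.empty).getD q PySem.Set.empty)
      = dict.getD q PySem.Set.empty := by
  split_ifs with h
  · rfl
  · by_cases hq : q = p
    · subst hq
      have h0 : dict.get? q = none :=
        (PySem.Dict.get?_eq_none_iff_contains dict q).mpr (by simpa using h)
      simp [PySem.Dict.getD, PySem.Dict.get?_insert_self, h0, PySem.Set.empty]
    · simp [PySem.Dict.getD, PySem.Dict.get?_insert_of_ne _ _ hq]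

lemma pvRel_ensure {dict : PySem.Dict String (PySem.Set String)} {simple : PySem.Set String}
    {seen : PySem.Set (String × String)} (p : String) (h : pvRel dict simple seen) :
    pvRel (if dict.contains p then dict else dict.insert p PySem.Set.empty) simple seen := by
  refine ⟨fun q arg hq => ?_, h.2⟩
  rw [pvEnsure_getD]
  exact h.1 q arg hq

-- invariant preserved when A records (p, arg) and the set records the key (p, arg)
lemma pvRel_add_arg {dict : PySem.Dict String (PySem.Set String)} {simple : PySem.Set String}
    {seen : PySem.Set (String × String)} (p arg : String) (hp : p ∈ pvFlagPrefixes)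
    (h : pvRel dict simple seen) :
    pvRel (((if dict.contains p then dict else dict.insert p PySem.Set.empty)).insert p
            (PySem.Set.add ((if dict.contains p then dict else dict.insert p PySem.Set.empty).getD p PySem.Set.empty) arg))
          simple (PySem.Set.add seen (p, arg)) := by
  obtain ⟨h1, h2⟩ := h
  constructor
  · intro q arg2 hq
    by_cases hpq : p = q
    · subst hpq
      simp only [PySem.Dict.getD, PySem.Dict.get?_insert_self, Option.getD_some]
      rw [pvSet_contains_add, pvSet_contains_add, ← PySem.Dict.getD, pvEnsure_getD,
        h1 p arg2 hp]
      have hbe : ((p, arg) == (p, arg2)) = (arg == arg2) := by simp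
      rw [hbe]
    · rw [PySem.Dict.getD, PySem.Dict.get?_insert_of_ne _ _ (fun h' => hpq h'.symm),
        ← PySem.Dict.getD, pvEnsure_getD, h1 q arg2 hq, pvSet_contains_add]
      have hbe : ((p, arg) == (q, arg2)) = false := by simp [hpq]
      simp [hbe]
  · intro f
    rw [pvSet_contains_add, h2 f]
    have hbe : ((p, arg) == ("simple", f)) = false := by simp [pvPrefix_ne_simple hp]
    simp [hbe]

-- invariant preserved when A records a simple flag and the set records ("simple", flag)
lemma pvRel_add_simple {dict : PySem.Dict String (PySem.Set String)} {simple : PySem.Set String}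
    {seen : PySem.Set (String × String)} (f : String) (h : pvRel dict simple seen) :
    pvRel dict (PySem.Set.add simple f) (PySem.Set.add seen ("simple", f)) := by
  obtain ⟨h1, h2⟩ := h
  constructor
  · intro q arg2 hq
    rw [h1 q arg2 hq, pvSet_contains_add]
    have hq' : "simple" ≠ q := fun h' => pvPrefix_ne_simple hq h'.symm
    have hbe : (("simple", f) == (q, arg2)) = false := by simp [hq']
    simp [hbe]
  · intro g
    rw [pvSet_contains_add, pvSet_contains_add, h2 g]
    have hbe : (("simple", f) == ("simple", g)) = (f == g) := by simp
    rw [hbe]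

lemma pvLoop_eq (n : Nat) : ∀ (rest : List String), rest.length ≤ n →
    ∀ dict simple seen acc, pvRel dict simple seen →
    pvLoopA rest dict simple acc = pvDedup (pvTokenize rest) seen acc := by
  induction n with
  | zero =>
    intro rest hlen dict simple seen acc _
    obtain rfl : rest = [] := by cases rest <;> simp_all
    simp [pvLoopA, pvTokenize, pvDedup]
  | succ n ih =>
    intro rest hlen dict simple seen acc h
    cases rest with
    | nil => simp [pvLoopA, pvTokenize, pvDedup]
    | cons flag rest =>
      rw [pvLoopA, pvTokenize, pvMatch_eq]
      cases hm : pvMatchB flag with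
      | none =>
        simp only [pvDedup]
        rw [← h.2 flag]
        by_cases hc : simple.contains flag = true
        · simp only [hc, if_true]
          exact ih rest (by simpa using hlen) _ _ _ _ h
        · simp only [hc]
          exact ih rest (by simpa using hlen) _ _ _ _ (pvRel_add_simple flag h)
      | some p =>
        have hp : p ∈ pvFlagPrefixes := List.mem_of_find?_eq_some hm
        cases he : (flag == p) with
        | true =>
          simp only [he, if_true]
          cases rest with
          | nil =>
            simp only [pvDedup]
            have hsc : ((if dict.contains p then dict else dict.insert p
                PySem.Set.empty).getD p PySem.Set.empty).contains
                (PySem.Str.slice flag (some (PySem.Str.len p)) none)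
                = seen.contains (p, PySem.Str.slice flag (some (PySem.Str.len p)) none) := by
              rw [pvEnsure_getD]
              exact h.1 p _ hp
            rw [hsc]
            by_cases hin : seen.contains (p, PySem.Str.slice flag (some (PySem.Str.len p)) none) = true
            · simp only [hin, if_true]
              exact ih [] (by simp) _ _ _ _ (pvRel_ensure p h)
            · simp only [hin]
              exact ih [] (by simp) _ _ _ _ (pvRel_add_arg p _ hp h)
          | cons arg rest2 =>
            simp only [pvDedup]
            have hsc : ((if dict.contains p then dict else dict.insert p
                PySem.Set.empty).getD p PySem.Set.empty).contains arg
                = seen.contains (p, arg) := by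
              rw [pvEnsure_getD]
              exact h.1 p arg hp
            rw [hsc]
            by_cases hin : seen.contains (p, arg) = true
            · simp only [hin, if_true]
              exact ih rest2 (by simp at hlen ⊢; omega) _ _ _ _ (pvRel_ensure p h)
            · simp only [hin]
              exact ih rest2 (by simp at hlen ⊢; omega) _ _ _ _ (pvRel_add_arg p arg hp h)
        | false =>
          simp only [he, Bool.false_eq_true, if_false, pvDedup]
          have hsc : ((if dict.contains p then dict else dict.insert p
              PySem.Set.empty).getD p PySem.Set.empty).contains
              (PySem.Str.slice flag (some (PySem.Str.len p)) none)
              = seen.contains (p, PySem.Str.slice flag (some (PySem.Str.len p)) none) := by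
            rw [pvEnsure_getD]
            exact h.1 p _ hp
          rw [hsc]
          by_cases hin : seen.contains (p, PySem.Str.slice flag (some (PySem.Str.len p)) none) = true
          · simp only [hin, if_true]
            exact ih rest (by simpa using hlen) _ _ _ _ (pvRel_ensure p h)
          · simp only [hin]
            exact ih rest (by simpa using hlen) _ _ _ _ (pvRel_add_arg p _ hp h)

-- A-side dedup equals the reference, given seen ≈ forb
lemma pvDedup_spec : ∀ (us : List ((String × String) × List String))
    (seen : PySem.Set (String × String)) (forb : List (String × String)) (acc : List String),
    (∀ k, seen.contains k = decide (k ∈ forb)) →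
    pvDedup us seen acc = acc ++ pvSpec us forb := by
  intro us
  induction us with
  | nil => intro seen forb acc _; simp [pvDedup, pvSpec]
  | cons u rest ih =>
    intro seen forb acc hrel
    obtain ⟨k, t⟩ := u
    rw [pvDedup, pvSpec, hrel k]
    by_cases hk : k ∈ forb
    · simp only [hk, decide_true, if_true]
      exact ih seen forb acc hrel
    · simp only [hk, decide_false, Bool.false_eq_true, if_false]
      rw [ih (seen.add k) (k :: forb) (acc ++ t) ?_, List.append_assoc]
      intro k2
      rw [pvSet_contains_add, hrel k2]
      by_cases h3 : k2 = k
      · subst h3; simp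
      · have hb3 : (k == k2) = false := beq_eq_false_iff_ne.mpr (fun h => h3 h.symm)
        simp [hb3, h3]

-- the backward overwrite fold reads back the FIRST matching pair of the forward list
lemma pvFoldInsert_get? {κ : Type} [BEq κ] [LawfulBEq κ]
    (L : List (Int × (κ × List String))) (d0 : PySem.Dict κ Int) (k : κ) :
    (L.reverse.foldl (fun d p => d.insert p.2.1 p.1) d0).get? k
      = match L.find? (fun p => p.2.1 == k) with
        | some p => some p.1
        | none => d0.get? k := by
  induction L generalizing d0 with
  | nil => simp
  | cons x L ih =>
    rw [List.reverse_cons, List.foldl_append]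
    simp only [List.foldl_cons, List.foldl_nil]
    cases hx : (x.2.1 == k) with
    | true =>
      have hxk : x.2.1 = k := by simpa using hx
      simp [hxk, PySem.Dict.get?_insert_self]
    | false =>
      have hne : x.2.1 ≠ k := by simpa using hx
      rw [PySem.Dict.get?_insert_of_ne _ _ (fun h => hne h.symm), ih]
      simp only [List.find?_cons, hx]

-- a foldl that conditionally extends = flatMap of conditional segments
lemma pvFoldExtendIf {α : Type} (L : List α) (c : α → Bool) (g : α → List String)
    (acc : List String) :
    L.foldl (fun acc p => if c p then acc ++ g p else acc) acc
      = acc ++ L.flatMap (fun p => if c p then g p else []) := by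
  induction L generalizing acc with
  | nil => simp
  | cons x L ih =>
    simp only [List.foldl_cons, List.flatMap_cons]
    cases hc : c x <;> simp [ih, List.append_assoc]

-- B's keep-if-first-index pass equals the reference
lemma pvEmit_spec : ∀ (us prevU : List ((String × String) × List String))
    (forb : List (String × String)),
    (∀ k, k ∈ forb ↔ k ∈ prevU.map (·.1)) →
    (PySem.List.enumerate us ((prevU.length : Int))).flatMap
      (fun p => if (pvFirstIdx (prevU ++ us)).getD p.2.1 (-1) == p.1 then p.2.2 else [])
      = pvSpec us forb := by
  intro us
  induction us with
  | nil => intro prevU forb _; simp [pvSpec, PySem.List.enumerate_nil]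
  | cons u rest ih =>
    intro prevU forb hforb
    obtain ⟨k, t⟩ := u
    rw [PySem.List.enumerate_cons, List.flatMap_cons, pvSpec]
    have hforb' : ∀ k0, k0 ∈ forb ∨ k0 = k ↔ k0 ∈ (prevU ++ [(k, t)]).map (·.1) := by
      intro k0
      rw [List.map_append, List.mem_append]
      simp only [List.map_cons, List.map_nil, List.mem_singleton]
      rw [hforb k0]
    have htail : ∀ forb2, (∀ k0, k0 ∈ forb2 ↔ k0 ∈ (prevU ++ [(k, t)]).map (·.1)) →
        (PySem.List.enumerate rest ((prevU.length : Int) + 1)).flatMap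
          (fun p => if (pvFirstIdx (prevU ++ (k, t) :: rest)).getD p.2.1 (-1) == p.1
                    then p.2.2 else [])
          = pvSpec rest forb2 := by
      intro forb2 h2
      have := ih (prevU ++ [(k, t)]) forb2 h2
      rw [List.append_assoc] at this
      simpa using this
    by_cases hk : k ∈ prevU.map (·.1)
    · -- k occurs among the earlier units: its first index is < |prevU|, this unit is dropped
      obtain ⟨u0, hu0, hu0k⟩ := List.exists_of_mem_map hk
      obtain ⟨j, hj, hje⟩ := List.mem_iff_getElem.mp hu0
      cases hf : (PySem.List.enumerate prevU).find? (fun p => p.2.1 == k) with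
      | none =>
        exact absurd (by simp [hje, hu0k] :
            ((fun p => p.2.1 == k) (((0 : Int) + (j : Int), prevU[j]))) = true)
          (List.find?_eq_none.mp hf _ ((PySem.List.mem_enumerate_iff _ _ _).mpr ⟨j, hj, rfl⟩))
      | some q =>
        obtain ⟨j2, hj2, hje2⟩ :=
          (PySem.List.mem_enumerate_iff _ _ _).mp (List.mem_of_find?_eq_some hf)
        have hqlt : q.1 < (prevU.length : Int) := by
          rw [hje2]
          show (0 : Int) + (j2 : Int) < (prevU.length : Int)
          omega
        have hfind : (PySem.List.enumerate (prevU ++ (k, t) :: rest)).find?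
            (fun p => p.2.1 == k) = some q := by
          rw [PySem.List.enumerate_append, List.find?_append, hf]
          rfl
        have hget : (pvFirstIdx (prevU ++ (k, t) :: rest)).get? k = some q.1 := by
          have h0 := pvFoldInsert_get?
            (PySem.List.enumerate (prevU ++ (k, t) :: rest)) PySem.Dict.empty k
          rw [hfind] at h0
          exact h0
        have hcond : ((pvFirstIdx (prevU ++ (k, t) :: rest)).getD k (-1)
            == ((prevU.length : Int))) = false := by
          rw [PySem.Dict.getD, hget]
          simp only [Option.getD_some, beq_eq_false_iff_ne, ne_eq]
          omega
        simp only [hcond, Bool.false_eq_true, if_false, List.nil_append]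
        rw [if_pos ((hforb k).mpr hk)]
        refine htail forb (fun k0 => ?_)
        rw [← hforb' k0]
        constructor
        · exact fun h => Or.inl h
        · rintro (h | rfl)
          · exact h
          · exact (hforb k0).mpr hk
    · -- first occurrence of k: it sits exactly at index |prevU|, so the unit is kept
      have hnone : (PySem.List.enumerate prevU).find? (fun p => p.2.1 == k) = none := by
        rw [List.find?_eq_none]
        intro q hq hpq
        obtain ⟨j, hj, hje⟩ := (PySem.List.mem_enumerate_iff _ _ _).mp hq
        refine hk ?_
        have hkey : prevU[j].1 = k := by
          rw [hje] at hpq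
          simpa using hpq
        exact hkey ▸ List.mem_map_of_mem (List.getElem_mem hj)
      have hfind : (PySem.List.enumerate (prevU ++ (k, t) :: rest)).find?
          (fun p => p.2.1 == k) = some ((0 : Int) + (prevU.length : Int), (k, t)) := by
        rw [PySem.List.enumerate_append, List.find?_append, hnone, PySem.List.enumerate_cons]
        simp
      have hget : (pvFirstIdx (prevU ++ (k, t) :: rest)).get? k
          = some ((0 : Int) + (prevU.length : Int)) := by
        have h0 := pvFoldInsert_get?
          (PySem.List.enumerate (prevU ++ (k, t) :: rest)) PySem.Dict.empty k
        rw [hfind] at h0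
        exact h0
      have hcond : ((pvFirstIdx (prevU ++ (k, t) :: rest)).getD k (-1)
          == ((prevU.length : Int))) = true := by
        rw [PySem.Dict.getD, hget]
        simp
      simp only [hcond, if_true]
      rw [if_neg (fun h => hk ((hforb k).mp h))]
      congr 1
      refine htail (k :: forb) (fun k0 => ?_)
      rw [← hforb' k0, List.mem_cons]
      tauto

-- ===== VERDICT (by name: the statement is the Claim_ definition above) =====
theorem deduplicate_compiler_flags_spec : Claim_equal_deduplicate_compiler_flags := by
  intro flags _
  unfold Spec_deduplicate_compiler_flags deduplicate_compiler_flags deduplicate_compiler_flags_alt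
  have hb : (PySem.List.enumerate (pvTokenize flags)).foldl
      (fun acc p => if (pvFirstIdx (pvTokenize flags)).getD p.2.1 (-1) == p.1
                    then acc ++ p.2.2 else acc) []
      = pvSpec (pvTokenize flags) [] := by
    rw [pvFoldExtendIf, List.nil_append]
    have := pvEmit_spec (pvTokenize flags) [] [] (by simp)
    simpa using this
  split_ifs with h
  · subst h
    rw [show pvTokenize [] = [] from by simp [pvTokenize]]
    simp [PySem.List.enumerate_nil]
  · rw [pvLoop_eq flags.length flags le_rfl _ _ _ _ pvRel_empty,
      pvDedup_spec _ _ [] [] (fun k => rfl), List.nil_append]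
    exact hb.symm
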